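-- pv_equiv track=rewrite | github.com/mortezamg63/JobAssistant | resumeBuilder2/app-Copy1.py | split_into_subsections
-- ===== SOURCE A (Python) =====
-- def split_into_subsections(lines):
--     """
--     Split a block into subsections every time we see a line with '|'.
--     """
--     subs = []
--     curr_title = None
--     curr = []
--     for raw in lines:
--         if '|' in raw:
--             if curr_title is not None:
--                 subs.append((curr_title, curr))
--             curr_title = raw.strip()
--             curr = []
--         else:
--             curr.append(raw)
--     if curr_title is not None:
--         subs.append((curr_title, curr))
--     if not subs:
--         return [(None, lines)]
--     return subs
-- ===== SOURCE B (Python) =====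
-- def _take_body(xs):
--     # collect lines until the first one containing '|'; return (body, remainder starting at that title)
--     body = []
--     for i, l in enumerate(xs):
--         if '|' in l:
--             return body, xs[i:]
--         body.append(l)
--     return body, []
--
--
-- def _sections(seg):
--     # seg is non-empty and seg[0] contains '|'
--     title = seg[0].strip()
--     body, rest = _take_body(seg[1:])
--     if not rest:
--         return [(title, body)]
--     return [(title, body)] + _sections(rest)
--
--
-- def split_into_subsections(lines):
--     """
--     Split a block into subsections every time we see a line with '|'.
--     """
--     _, rest = _take_body(lines)
--     if not rest:
--         return [(None, lines)]
--     return _sections(rest)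
-- ===== Notes on version B (the rewrite author's own statement) =====
-- stated objective: simpler
-- what changed: Replaces A's single fold with mutable state (subs, curr_title, curr) plus two post-loop fixups by structural recursion: a helper splits off the body up to the next title and _sections recurses on the remaining suffix, so no accumulator state or trailing-flush/empty checks are needed.
import Mathlib
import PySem

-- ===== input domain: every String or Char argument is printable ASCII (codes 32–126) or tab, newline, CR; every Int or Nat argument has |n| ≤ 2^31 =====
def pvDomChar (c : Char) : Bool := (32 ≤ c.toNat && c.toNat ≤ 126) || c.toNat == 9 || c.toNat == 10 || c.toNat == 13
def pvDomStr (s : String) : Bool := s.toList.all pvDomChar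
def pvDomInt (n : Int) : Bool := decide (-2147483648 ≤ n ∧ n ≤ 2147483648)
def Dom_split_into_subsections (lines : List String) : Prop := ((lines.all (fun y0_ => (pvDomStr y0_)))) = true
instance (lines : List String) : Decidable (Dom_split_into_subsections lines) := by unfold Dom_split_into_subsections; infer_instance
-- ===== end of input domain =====

-- B recursively splits off one section at a time instead of A's single fold over mutable accumulator state; same O(n) cost.

-- ===== PORT A =====
-- fold state: (subs, curr_title, curr) — exactly A's three mutable variables; pvStepA is A's loop body
def pvStepA (st : List (Option String × List String) × Option String × List String)
    (raw : String) : List (Option String × List String) × Option String × List String :=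
  if PySem.Str.isIn "|" raw then
    match st.2.1 with
    | some t => (st.1 ++ [(some t, st.2.2)], some (PySem.Str.strip raw), [])
    | none => (st.1, some (PySem.Str.strip raw), [])
  else
    (st.1, st.2.1, st.2.2 ++ [raw])

def split_into_subsections (lines : List String) : List (Option String × List String) :=
  let st := lines.foldl pvStepA ([], none, [])
  let subs := match st.2.1 with
    | some t => st.1 ++ [(some t, st.2.2)]
    | none => st.1
  if subs = [] then [(none, lines)] else subs

-- ===== PORT B =====
-- _take_body: lines until the first one containing '|', plus the remainder starting at that title
def pvTakeBody : List String → List String × List String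
  | [] => ([], [])
  | l :: xs =>
    if PySem.Str.isIn "|" l then ([], l :: xs)
    else
      let r := pvTakeBody xs
      (l :: r.1, r.2)

theorem pvTakeBody_snd_length (xs : List String) : (pvTakeBody xs).2.length ≤ xs.length := by
  induction xs with
  | nil => simp [pvTakeBody]
  | cons l xs ih =>
    simp only [pvTakeBody]
    split
    · simp
    · simpa using Nat.le_succ_of_le ih

-- _sections: head is a title; split off its body, recurse on the remainder
def pvSections : List String → List (Option String × List String)
  | [] => []
  | t :: r =>
    let br := pvTakeBody r
    if br.2 = [] then [(some (PySem.Str.strip t), br.1)]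
    else (some (PySem.Str.strip t), br.1) :: pvSections br.2
termination_by seg => seg.length
decreasing_by
  simpa using Nat.lt_succ_of_le (pvTakeBody_snd_length r)

def split_into_subsections_alt (lines : List String) : List (Option String × List String) :=
  let rest := (pvTakeBody lines).2
  if rest = [] then [(none, lines)]
  else pvSections rest

-- ===== PRECONDITION & SPEC =====
def Spec_split_into_subsections (lines : List String) (out : List (Option String × List String)) : Prop := out = split_into_subsections_alt lines
instance (lines : List String) (out : List (Option String × List String)) : Decidable (Spec_split_into_subsections lines out) := by unfold Spec_split_into_subsections; infer_instance

-- ===== CLAIM (what is proved, stated in full; the proofs are below) =====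
def Claim_equal_split_into_subsections : Prop := ∀ (lines : List String), Dom_split_into_subsections lines → Spec_split_into_subsections lines (split_into_subsections lines)

-- ===== LEMMAS AND PROOFS =====

-- pvTakeBody decomposes its input: body ++ rest, body title-free, rest empty or starting at a title
theorem pvTakeBody_spec (xs : List String) :
    xs = (pvTakeBody xs).1 ++ (pvTakeBody xs).2 ∧
    (∀ l ∈ (pvTakeBody xs).1, PySem.Str.isIn "|" l = false) ∧
    (∀ l r', (pvTakeBody xs).2 = l :: r' → PySem.Str.isIn "|" l = true) := by
  induction xs with
  | nil => simp [pvTakeBody]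
  | cons l xs ih =>
    by_cases h : PySem.Str.isIn "|" l = true
    · simp only [pvTakeBody]
      rw [if_pos h]
      refine ⟨by simp, by simp, ?_⟩
      intro a r' hr
      obtain ⟨rfl, rfl⟩ := by simpa using hr
      exact h
    · simp only [pvTakeBody]
      rw [if_neg h]
      refine ⟨?_, ?_, ih.2.2⟩
      · simpa using ih.1
      · intro a ha
        rcases List.mem_cons.mp ha with rfl | ha
        · simpa using h
        · exact ih.2.1 a ha

-- A's loop over a title-free segment just appends it to curr
theorem foldl_stepA_free (xs : List String) (subs : List (Option String × List String))
    (t : Option String) (c : List String)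
    (h : ∀ l ∈ xs, PySem.Str.isIn "|" l = false) :
    xs.foldl pvStepA (subs, t, c) = (subs, t, c ++ xs) := by
  induction xs generalizing c with
  | nil => simp
  | cons l xs ih =>
    have hl : ¬ PySem.Str.isIn "|" l = true := by
      simpa using h l (by simp)
    simp only [List.foldl_cons, pvStepA]
    rw [if_neg hl, ih (c ++ [l]) (fun a ha => h a (by simp [ha]))]
    simp

-- once a title is current, finishing A's loop yields the sections of the remaining suffix
theorem foldl_stepA_titled (xs : List String) (t : String) (c : List String)
    (subs : List (Option String × List String)) :
    (match (xs.foldl pvStepA (subs, some t, c)).2.1 with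
      | some t' => (xs.foldl pvStepA (subs, some t, c)).1 ++ [(some t', (xs.foldl pvStepA (subs, some t, c)).2.2)]
      | none => (xs.foldl pvStepA (subs, some t, c)).1) =
    subs ++ (if (pvTakeBody xs).2 = [] then [(some t, c ++ (pvTakeBody xs).1)]
             else (some t, c ++ (pvTakeBody xs).1) :: pvSections (pvTakeBody xs).2) := by
  induction xs generalizing t c subs with
  | nil => simp [pvTakeBody]
  | cons l xs ih =>
    by_cases h : PySem.Str.isIn "|" l = true
    · simp only [List.foldl_cons, pvStepA]
      rw [if_pos h, ih (PySem.Str.strip l) [] (subs ++ [(some t, c)])]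
      simp only [pvTakeBody]
      rw [if_pos h, pvSections]
      simp
    · simp only [List.foldl_cons, pvStepA]
      rw [if_neg h, ih t (c ++ [l]) subs]
      simp only [pvTakeBody]
      rw [if_neg h]
      simp

theorem split_eq_alt (lines : List String) :
    split_into_subsections lines = split_into_subsections_alt lines := by
  obtain ⟨hdec, hfree, htit⟩ := pvTakeBody_spec lines
  cases hrest : (pvTakeBody lines).2 with
  | nil =>
    have hall : ∀ l ∈ lines, PySem.Str.isIn "|" l = false := by
      intro l hl
      rw [hdec, hrest] at hl
      exact hfree l (by simpa using hl)
    unfold split_into_subsections split_into_subsections_alt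
    rw [foldl_stepA_free lines ([] : List (Option String × List String)) none [] hall, hrest]
    simp
  | cons l r' =>
    have hl : PySem.Str.isIn "|" l = true := htit l r' hrest
    have halt : split_into_subsections_alt lines = pvSections (l :: r') := by
      unfold split_into_subsections_alt
      rw [hrest]
      simp
    have hlines : lines = (pvTakeBody lines).1 ++ (l :: r') := by
      conv_lhs => rw [hdec, hrest]
    have hst : lines.foldl pvStepA (([] : List (Option String × List String)), none, ([] : List String)) =
        r'.foldl pvStepA ([], some (PySem.Str.strip l), []) := by
      conv_lhs => rw [hlines]
      rw [List.foldl_append,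
        foldl_stepA_free (pvTakeBody lines).1 ([] : List (Option String × List String)) none []
          (fun a ha => hfree a ha)]
      simp only [List.foldl_cons, pvStepA]
      rw [if_pos hl]
    have hfin := foldl_stepA_titled r' (PySem.Str.strip l) [] ([] : List (Option String × List String))
    simp only [List.nil_append] at hfin
    unfold split_into_subsections
    rw [halt, hst]
    simp only [hfin]
    rw [pvSections]
    split <;> simp

-- ===== VERDICT (by name: the statement is the Claim_ definition above) =====
theorem split_into_subsections_spec : Claim_equal_split_into_subsections := by
  intro lines _
  exact split_eq_alt lines
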